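-- pv_equiv track=rewrite | github.com/MackanT/PBIxtractor | PBIxtractor.py | get_data_type
-- ===== SOURCE A (Python) =====
-- def find_nth_occurence(substring: str, string: str, n: int) -> int:
--     '''
--     returns starting index of n:th substring in string
--     '''
--     count = 0
--     index = -1
--
--     while count < n:
--         index = string.find(substring, index + 1)
--
--         if index == -1:
--             break
--
--         count += 1
--
--     return index
--
-- def get_data_type(string: str) -> tuple[str, str, str]:
--     data = "Table"
--     start_pos = find_nth_occurence(".", string, 2) + 1
--     end_pos = find_nth_occurence(".", string, 3)
--     if end_pos == -1:
--         table = string[start_pos:]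
--     else:
--         table = string[start_pos:end_pos]
--
--     column = ""
--     if any(substring in string for substring in [".C.", ".H.", ".M."]):
--         start_pos = find_nth_occurence(".", string, 4) + 1
--         end_pos = find_nth_occurence(".", string, 5)
--         if end_pos == -1 or end_pos < len(string):
--             column = string[start_pos:]
--         else:
--             column = string[start_pos:end_pos]
--
--         if ".C." in string:
--             data = "Column"
--         elif ".H." in string:
--             data = "Hierarchy"
--         elif ".M." in string:
--             data = "Measure"
--
--     return (data, table, column)
-- ===== SOURCE B (Python) =====
-- def get_data_type(string: str) -> tuple[str, str, str]:
--     positions = [i for i, c in enumerate(string) if c == '.']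
--     start = positions[1] + 1 if len(positions) >= 2 else 0
--     table = string[start:positions[2]] if len(positions) >= 3 else string[start:]
--     data = "Table"
--     column = ""
--     if ".C." in string or ".H." in string or ".M." in string:
--         col_start = positions[3] + 1 if len(positions) >= 4 else 0
--         column = string[col_start:]
--         data = "Column" if ".C." in string else "Hierarchy" if ".H." in string else "Measure"
--     return (data, table, column)
-- ===== Notes on version B (the rewrite author's own statement) =====
-- stated objective: simpler
-- what changed: B replaces A's repeated find-nth-dot scanning loop with a single pass that collects all dot positions into a list and reads table/column boundaries off that list by index; the always-true end-of-string branch for column is dropped.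
import Mathlib
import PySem

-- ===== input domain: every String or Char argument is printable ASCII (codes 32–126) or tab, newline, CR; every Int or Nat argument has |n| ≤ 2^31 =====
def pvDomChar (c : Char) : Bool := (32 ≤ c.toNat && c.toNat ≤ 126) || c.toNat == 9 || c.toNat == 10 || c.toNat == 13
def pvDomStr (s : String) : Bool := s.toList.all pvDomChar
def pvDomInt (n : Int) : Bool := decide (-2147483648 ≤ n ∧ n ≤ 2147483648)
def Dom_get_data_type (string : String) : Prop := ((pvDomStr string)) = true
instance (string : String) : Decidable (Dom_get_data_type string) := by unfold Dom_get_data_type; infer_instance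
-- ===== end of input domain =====

-- B replaces A's repeated find-nth-dot rescanning loop with one pass collecting all dot
-- positions into a list and indexing into it (objective: simpler; same asymptotic cost).

-- ===== PORT A =====
-- the while loop of find_nth_occurence: state (count, index)
def fnoGo (substring string : String) (n count index : Int) : Int :=
  if _h : count < n then
    let i := PySem.Str.findFrom string substring (index + 1)
    if i = -1 then i
    else fnoGo substring string n (count + 1) i
  else index
termination_by (n - count).toNat
decreasing_by omega

def find_nth_occurence (substring : String) (string : String) (n : Int) : Int :=
  fnoGo substring string n 0 (-1)

def get_data_type (string : String) : String × String × String :=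
  let data := "Table"
  let start_pos := find_nth_occurence "." string 2 + 1
  let end_pos := find_nth_occurence "." string 3
  let table :=
    if end_pos = -1 then PySem.Str.slice string (some start_pos) none
    else PySem.Str.slice string (some start_pos) (some end_pos)
  let column := ""
  if PySem.Str.isIn ".C." string || PySem.Str.isIn ".H." string || PySem.Str.isIn ".M." string then
    let start_pos := find_nth_occurence "." string 4 + 1
    let end_pos := find_nth_occurence "." string 5
    let column :=
      if end_pos = -1 || end_pos < PySem.Str.len string then
        PySem.Str.slice string (some start_pos) none
      else PySem.Str.slice string (some start_pos) (some end_pos)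
    let data :=
      if PySem.Str.isIn ".C." string then "Column"
      else if PySem.Str.isIn ".H." string then "Hierarchy"
      else if PySem.Str.isIn ".M." string then "Measure"
      else data
    (data, table, column)
  else (data, table, column)

-- ===== PORT B =====
def get_data_type_alt (string : String) : String × String × String :=
  let positions : List Int :=
    ((PySem.List.enumerate string.toList 0).filter (fun p => p.2 == '.')).map (·.1)
  let start : Int := if 2 ≤ positions.length then PySem.List.pyGetD positions 1 0 + 1 else 0
  let table :=
    if 3 ≤ positions.length then
      PySem.Str.slice string (some start) (some (PySem.List.pyGetD positions 2 0))
    else PySem.Str.slice string (some start) none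
  let data := "Table"
  let column := ""
  if PySem.Str.isIn ".C." string || PySem.Str.isIn ".H." string || PySem.Str.isIn ".M." string then
    let col_start : Int := if 4 ≤ positions.length then PySem.List.pyGetD positions 3 0 + 1 else 0
    let column := PySem.Str.slice string (some col_start) none
    let data :=
      if PySem.Str.isIn ".C." string then "Column"
      else if PySem.Str.isIn ".H." string then "Hierarchy"
      else "Measure"
    (data, table, column)
  else (data, table, column)

-- ===== PRECONDITION & SPEC =====
def Spec_get_data_type (string : String) (out : String × String × String) : Prop := out = get_data_type_alt string
instance (string : String) (out : String × String × String) : Decidable (Spec_get_data_type string out) := by unfold Spec_get_data_type; infer_instance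

-- ===== CLAIM (what is proved, stated in full; the proofs are below) =====
def Claim_equal_get_data_type : Prop := ∀ (string : String), Dom_get_data_type string → Spec_get_data_type string (get_data_type string)

-- ===== LEMMAS AND PROOFS =====

-- the list of indices of '.' in cs, counting from base b
def dotIdx : List Char → Int → List Int
  | [], _ => []
  | c :: cs, b => if c = '.' then b :: dotIdx cs (b + 1) else dotIdx cs (b + 1)

-- what the fnoGo loop computes, expressed over the list of remaining dot positions
def nthRes : List Int → Int → Int → Int
  | [], m, idx => if m ≤ 0 then idx else -1
  | i :: R, m, idx => if m ≤ 0 then idx else nthRes R (m - 1) i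

theorem dotIdx_mem_iff (cs : List Char) (b i : Int) :
    i ∈ dotIdx cs b ↔ ∃ j : Nat, j < cs.length ∧ cs[j]? = some '.' ∧ i = b + j := by
  induction cs generalizing b with
  | nil => simp [dotIdx]
  | cons c cs ih =>
    simp only [dotIdx]
    constructor
    · intro h
      have step : i ∈ dotIdx cs (b + 1) → ∃ j : Nat, j < (c :: cs).length ∧ (c :: cs)[j]? = some '.' ∧ i = b + j := by
        intro h'
        rcases (ih (b + 1)).1 h' with ⟨j, hj, hd, he⟩
        exact ⟨j + 1, by simpa using hj, by simpa using hd, by push_cast at he ⊢; omega⟩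
      split at h
      · rcases List.mem_cons.1 h with h | h
        · exact ⟨0, by simp, by simp; assumption, by simpa using h⟩
        · exact step h
      · exact step h
    · rintro ⟨j, hj, hd, he⟩
      cases j with
      | zero =>
        simp only [List.getElem?_cons_zero, Option.some.injEq] at hd
        simp [hd, he]
      | succ j =>
        have : i ∈ dotIdx cs (b + 1) :=
          (ih (b + 1)).2 ⟨j, by simpa using hj, by simpa using hd, by push_cast at he ⊢; omega⟩
        split <;> simp [this]

theorem dotIdx_ge (cs : List Char) (b : Int) : ∀ i ∈ dotIdx cs b, b ≤ i := by
  intro i hi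
  rcases (dotIdx_mem_iff cs b i).1 hi with ⟨j, _, _, rfl⟩
  omega

theorem dotIdx_lt (cs : List Char) (b : Int) : ∀ i ∈ dotIdx cs b, i < b + cs.length := by
  intro i hi
  rcases (dotIdx_mem_iff cs b i).1 hi with ⟨j, hj, _, rfl⟩
  omega

theorem dotIdx_pairwise (cs : List Char) (b : Int) : (dotIdx cs b).Pairwise (· < ·) := by
  induction cs generalizing b with
  | nil => simp [dotIdx]
  | cons c cs ih =>
    simp only [dotIdx]
    split
    · exact List.pairwise_cons.2 ⟨fun i hi => by have := dotIdx_ge cs (b + 1) i hi; omega, ih (b + 1)⟩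
    · exact ih (b + 1)

theorem dotIdx_complete (cs : List Char) (b : Int) (j : Nat) (hj : j < cs.length)
    (hd : cs[j]? = some '.') : b + j ∈ dotIdx cs b :=
  (dotIdx_mem_iff cs b (b + j)).2 ⟨j, hj, hd, rfl⟩

theorem dotIdx_add (cs : List Char) (b t : Int) : dotIdx cs (b + t) = (dotIdx cs b).map (· + t) := by
  induction cs generalizing b with
  | nil => simp [dotIdx]
  | cons c cs ih =>
    have harith : b + t + 1 = (b + 1) + t := by ring
    simp only [dotIdx]
    split
    · simp [harith, ih (b + 1)]
    · simp [harith, ih (b + 1)]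

theorem dotIdx_drop (cs : List Char) : ∀ (m : Nat) (b : Int),
    dotIdx (cs.drop m) (b + m) = (dotIdx cs b).filter (fun i => decide (b + m ≤ i)) := by
  induction cs with
  | nil => intro m b; simp [dotIdx]
  | cons c cs ih =>
    intro m b
    cases m with
    | zero =>
      simp only [List.drop_zero, Nat.cast_zero, add_zero]
      exact (List.filter_eq_self.2 (fun i hi => by simpa using dotIdx_ge _ b i hi)).symm
    | succ m =>
      have harith : b + (((m + 1 : Nat) : Int)) = (b + 1) + (m : Int) := by push_cast; ring
      simp only [List.drop_succ_cons, dotIdx, harith]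
      split
      · rw [List.filter_cons, if_neg (by simp; omega)]
        exact ih m (b + 1)
      · exact ih m (b + 1)

-- Chars.find on a single '.' returns the head of the dot-position list
theorem find_dot (cs : List Char) :
    PySem.Chars.find cs ['.'] = (dotIdx cs 0).headD (-1) := by
  have prefix_iff : ∀ j : Nat, (['.'] <+: cs.drop j) ↔ cs[j]? = some '.' := by
    intro j
    constructor
    · rintro ⟨t, ht⟩
      have : (cs.drop j).head? = some '.' := by rw [← ht]; simp
      rwa [List.head?_drop] at this
    · intro h
      have hh : (cs.drop j).head? = some '.' := by rwa [List.head?_drop]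
      rcases List.head?_eq_some_iff.1 hh with ⟨t, ht⟩
      exact ⟨t, by simp [ht]⟩
  cases hD : dotIdx cs 0 with
  | nil =>
    have hno : '.' ∉ cs := by
      intro hm
      obtain ⟨j, hj, he⟩ := List.mem_iff_getElem.1 hm
      have : (0 : Int) + j ∈ dotIdx cs 0 :=
        dotIdx_complete cs 0 j hj (by simp [List.getElem?_eq_getElem hj, he])
      simp [hD] at this
    have hni : ¬ (['.'] <:+: cs) := fun h => hno (h.subset (by simp))
    rw [(PySem.Chars.find_eq_neg_one_iff cs ['.']).2 hni]
    simp
  | cons h t =>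
    have hh : h ∈ dotIdx cs 0 := by simp [hD]
    rcases (dotIdx_mem_iff cs 0 h).1 hh with ⟨j, hj, hd, he⟩
    have hinf : ['.'] <:+: cs :=
      (PySem.Chars.isIn_iff_infix _ _).1 ((PySem.Chars.exists_prefix_drop_iff_isIn _ _).1 ⟨j, (prefix_iff j).2 hd⟩)
    have hnonneg : 0 ≤ PySem.Chars.find cs ['.'] := (PySem.Chars.find_nonneg_iff _ _).2 hinf
    obtain ⟨hpre, hmin⟩ := PySem.Chars.find_spec hnonneg
    set f : Nat := (PySem.Chars.find cs ['.']).toNat with hf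
    have hflt : f < cs.length := by
      by_contra hge
      have hnil : cs.drop f = [] := List.drop_eq_nil_of_le (by omega)
      rw [hnil] at hpre
      exact absurd (List.prefix_nil.1 hpre) (by simp)
    have hfd : cs[f]? = some '.' := (prefix_iff f).1 hpre
    have hfmem : (f : Int) ∈ dotIdx cs 0 := by simpa using dotIdx_complete cs 0 f hflt hfd
    have hhle : h ≤ (f : Int) := by
      rw [hD] at hfmem
      rcases List.mem_cons.1 hfmem with h1 | h2
      · omega
      · have := (List.pairwise_cons.1 (hD ▸ dotIdx_pairwise cs 0)).1 _ h2
        omega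
    have hfle : (f : Int) ≤ h := by
      by_contra hlt
      have hjf : j < f := by omega
      exact hmin j hjf ((prefix_iff j).2 hd)
    have hfh : (f : Int) = h := le_antisymm hfle hhle
    rw [List.headD_cons, ← hfh, hf, Int.toNat_of_nonneg hnonneg]

theorem findFrom_dot (s : List Char) (k : Int) (h0 : 0 ≤ k) (h1 : k ≤ s.length) :
    PySem.Chars.findFrom s ['.'] k =
      ((dotIdx s 0).filter (fun i => decide (k ≤ i))).headD (-1) := by
  obtain ⟨m, rfl⟩ : ∃ m : Nat, k = (m : Int) := ⟨k.toNat, by omega⟩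
  rw [PySem.Chars.findFrom_natCast s _ m (by exact_mod_cast h1)]
  have hdrop : dotIdx (s.drop m) ((0 : Int) + m) = (dotIdx s 0).filter (fun i => decide ((0 : Int) + m ≤ i)) := dotIdx_drop s m 0
  simp only [zero_add] at hdrop
  have hshift : dotIdx (s.drop m) ((0 : Int) + m) = (dotIdx (s.drop m) 0).map (· + (m : Int)) := dotIdx_add _ 0 (m : Int)
  simp only [zero_add] at hshift
  rw [find_dot (s.drop m)]
  cases hL : dotIdx (s.drop m) 0 with
  | nil =>
    rw [hL] at hshift
    rw [← hdrop, hshift]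
    simp
  | cons a L =>
    have ha : 0 ≤ a := dotIdx_ge _ 0 a (by rw [hL]; exact List.mem_cons_self)
    rw [hL] at hshift
    rw [← hdrop, hshift]
    simp only [List.map_cons, List.headD_cons]
    rw [if_neg (by omega)]
    omega

theorem nthRes_nonpos (R : List Int) (m idx : Int) (h : m ≤ 0) : nthRes R m idx = idx := by
  cases R <;> simp [nthRes, h]

theorem filter_step (D : List Int) (hp : D.Pairwise (· < ·)) (k h : Int) (R : List Int)
    (hf : D.filter (fun i => decide (k ≤ i)) = h :: R) :
    D.filter (fun i => decide (h + 1 ≤ i)) = R := by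
  have hkh : k ≤ h := by
    have hm : h ∈ D.filter (fun i => decide (k ≤ i)) := by simp [hf]
    simpa using (List.mem_filter.1 hm).2
  have h1 : D.filter (fun i => decide (h + 1 ≤ i)) =
      (D.filter (fun i => decide (k ≤ i))).filter (fun i => decide (h + 1 ≤ i)) := by
    rw [List.filter_filter]
    apply List.filter_congr
    intro x _
    by_cases hx : h + 1 ≤ x
    · simp [hx, show k ≤ x by omega]
    · simp [hx]
  rw [h1, hf, List.filter_cons, if_neg (by simp)]
  apply List.filter_eq_self.2
  intro x hx
  have hpf : (h :: R).Pairwise (· < ·) := hf ▸ hp.filter _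
  have hlt := (List.pairwise_cons.1 hpf).1 x hx
  simp; omega

theorem fnoGo_dot (s : String) : ∀ (f : Nat) (n count index : Int),
    (n - count).toNat = f → (index = -1 ∨ index ∈ dotIdx s.toList 0) →
    fnoGo "." s n count index =
      nthRes ((dotIdx s.toList 0).filter (fun i => decide (index + 1 ≤ i))) (n - count) index := by
  intro f
  induction f using Nat.strong_induction_on with
  | _ f ih =>
    intro n count index hf hinv
    rw [fnoGo]
    by_cases hcn : count < n
    · rw [dif_pos hcn]
      have h0 : 0 ≤ index + 1 := by
        rcases hinv with rfl | hmem
        · omega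
        · have := dotIdx_ge s.toList 0 index hmem; omega
      have h1 : index + 1 ≤ (s.toList.length : Int) := by
        rcases hinv with rfl | hmem
        · omega
        · have := dotIdx_lt s.toList 0 index hmem; omega
      have hFF : PySem.Str.findFrom s "." (index + 1) =
          ((dotIdx s.toList 0).filter (fun i => decide (index + 1 ≤ i))).headD (-1) := by
        rw [show PySem.Str.findFrom s "." (index + 1) = PySem.Chars.findFrom s.toList ".".toList (index + 1) from by simp]
        exact findFrom_dot s.toList (index + 1) h0 h1
      cases hR : (dotIdx s.toList 0).filter (fun i => decide (index + 1 ≤ i)) with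
      | nil =>
        rw [hR] at hFF
        simp only [hFF, List.headD_nil]
        norm_num
        rw [nthRes, if_neg (by omega)]
      | cons h R' =>
        have hhmem : h ∈ dotIdx s.toList 0 := by
          have : h ∈ (dotIdx s.toList 0).filter (fun i => decide (index + 1 ≤ i)) := by
            rw [hR]; exact List.mem_cons_self
          exact List.mem_of_mem_filter this
        have hh0 : 0 ≤ h := dotIdx_ge _ 0 h hhmem
        rw [hR] at hFF
        simp only [hFF, List.headD_cons]
        rw [if_neg (by omega)]
        rw [ih (n - (count + 1)).toNat (by omega) n (count + 1) h rfl (Or.inr hhmem)]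
        rw [filter_step _ (dotIdx_pairwise _ 0) (index + 1) h R' hR]
        rw [nthRes, if_neg (by omega)]
        congr 1
        omega
    · rw [dif_neg hcn, nthRes_nonpos _ _ _ (by omega)]

theorem fno_eq (s : String) (n : Int) :
    find_nth_occurence "." s n = nthRes (dotIdx s.toList 0) n (-1) := by
  unfold find_nth_occurence
  rw [fnoGo_dot s (n - 0).toNat n 0 (-1) rfl (Or.inl rfl)]
  have hid : (dotIdx s.toList 0).filter (fun i => decide ((-1 : Int) + 1 ≤ i)) = dotIdx s.toList 0 :=
    List.filter_eq_self.2 (fun i hi => by simpa using dotIdx_ge _ 0 i hi)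
  rw [hid]
  norm_num

theorem positions_eq (cs : List Char) : ∀ (b : Int),
    ((PySem.List.enumerate cs b).filter (fun p => p.2 == '.')).map (·.1) = dotIdx cs b := by
  induction cs with
  | nil => intro b; simp [PySem.List.enumerate_nil, dotIdx]
  | cons c cs ih =>
    intro b
    rw [PySem.List.enumerate_cons, dotIdx, List.filter_cons]
    by_cases hc : c = '.'
    · simp [hc, ih (b + 1)]
    · simp [hc, ih (b + 1)]

-- ===== VERDICT (by name: the statement is the Claim_ definition above) =====
theorem get_data_type_spec : Claim_equal_get_data_type := by
  unfold Claim_equal_get_data_type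
  intro s _
  unfold Spec_get_data_type get_data_type get_data_type_alt
  rw [positions_eq s.toList 0, fno_eq, fno_eq, fno_eq, fno_eq]
  have hge := dotIdx_ge s.toList 0
  have hlt := dotIdx_lt s.toList 0
  match hD : dotIdx s.toList 0 with
  | [] =>
    simp only [show ∀ m : Int, nthRes [] m (-1) = -1 from fun m => by rw [nthRes]; split <;> rfl]
    norm_num
    split_ifs <;> simp_all
  | [a] =>
    have ha : 0 ≤ a := hge a (by rw [hD]; simp)
    norm_num [nthRes, PySem.List.pyGetD, PySem.List.pyGet?, PySem.List.pyIdx?]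
    split_ifs <;> simp_all
  | [a, b] =>
    have hb : 0 ≤ b := hge b (by rw [hD]; simp)
    norm_num [nthRes, PySem.List.pyGetD, PySem.List.pyGet?, PySem.List.pyIdx?]
    split_ifs <;> simp_all
  | [a, b, c] =>
    have hb : 0 ≤ b := hge b (by rw [hD]; simp)
    have hc : 0 ≤ c := hge c (by rw [hD]; simp)
    norm_num [nthRes, PySem.List.pyGetD, PySem.List.pyGet?, PySem.List.pyIdx?]
    split_ifs <;> simp_all
  | [a, b, c, d] =>
    have hb : 0 ≤ b := hge b (by rw [hD]; simp)
    have hc : 0 ≤ c := hge c (by rw [hD]; simp)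
    have hd : 0 ≤ d := hge d (by rw [hD]; simp)
    norm_num [nthRes, PySem.List.pyGetD, PySem.List.pyGet?, PySem.List.pyIdx?]
    split_ifs <;> simp_all
  | a :: b :: c :: d :: e :: rest =>
    have hb : 0 ≤ b := hge b (by rw [hD]; simp)
    have hc : 0 ≤ c := hge c (by rw [hD]; simp)
    have hd : 0 ≤ d := hge d (by rw [hD]; simp)
    have he0 : 0 ≤ e := hge e (by rw [hD]; simp)
    have he : e < 0 + (s.toList.length : Int) := hlt e (by rw [hD]; simp)
    have hrest : nthRes rest 0 e = e := nthRes_nonpos rest 0 e le_rfl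
    have g1 : PySem.List.pyGetD (a::b::c::d::e::rest) 1 0 = b := by
      simp [PySem.List.pyGetD, PySem.List.pyGet?, PySem.List.pyIdx?]
      rw [if_pos (by omega)]; rfl
    have g2 : PySem.List.pyGetD (a::b::c::d::e::rest) 2 0 = c := by
      simp [PySem.List.pyGetD, PySem.List.pyGet?, PySem.List.pyIdx?]
      rw [if_pos (by omega)]; rfl
    have g3 : PySem.List.pyGetD (a::b::c::d::e::rest) 3 0 = d := by
      simp [PySem.List.pyGetD, PySem.List.pyGet?, PySem.List.pyIdx?]
      rw [if_pos (by omega)]; rfl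
    have he' : e < (s.length : Int) := by simpa using he
    norm_num [nthRes, PySem.Str.len_eq, g1, g2, g3]
    rw [hrest]
    split_ifs <;> first | rfl | omega | tauto
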